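-- pv_equiv track=rewrite | github.com/MustafaHaddara/google-code-jam-2018 | qual/trouble/trouble.py | verify_trouble_sort
-- ===== SOURCE A (Python) =====
-- def trouble_sort(num_list):
--     done = False
--     while not done:
--         done = True
--         for i in range(len(num_list) - 2):
--             if num_list[i] > num_list[i+2]:
--                 done = False
--                 # reverse the sublist from num_list[i] to num_list[i+2], inclusive
--                 # notice that num_list[i+1] remins the same!
--                 num_list[i], num_list[i+2] = num_list[i+2], num_list[i]
--     return num_list
--
-- def verify_trouble_sort(num_list):
--     trouble_sort(num_list)  # sorts in place
--     prev = None
--     for idx, item in enumerate(num_list):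
--         num = int(item)
--         if prev is None:
--             prev = num
--             continue
--         if num < prev:
--             return str(idx-1)
--         prev = num
--     return 'OK'
-- ===== SOURCE B (Python) =====
-- def verify_trouble_sort(num_list):
--     # Trouble sort never moves an element between even and odd positions, so its
--     # fixpoint is just: each parity class sorted independently, interleaved.
--     evens = []
--     odds = []
--     for i, x in enumerate(num_list):
--         if i % 2 == 0:
--             evens.append(x)
--         else:
--             odds.append(x)
--     evens = sorted(evens)
--     odds = sorted(odds)
--     result = []
--     for e, o in zip(evens, odds):
--         result.append(e)
--         result.append(o)
--     if len(odds) < len(evens):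
--         result.append(evens[-1])
--     num_list[:] = result  # A trouble-sorts the caller's list in place; match that side effect
--     for i, (a, b) in enumerate(zip(result, result[1:])):
--         if a > b:
--             return str(i)
--     return 'OK'
-- ===== Notes on version B (the rewrite author's own statement) =====
-- stated objective: faster
-- what changed: Replaces the repeated bubble passes over stride-2 pairs (a quadratic-pass fixpoint loop) by splitting into even- and odd-index sublists, sorting each once with sorted(), interleaving, and scanning once for the first inversion.
import Mathlib
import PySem

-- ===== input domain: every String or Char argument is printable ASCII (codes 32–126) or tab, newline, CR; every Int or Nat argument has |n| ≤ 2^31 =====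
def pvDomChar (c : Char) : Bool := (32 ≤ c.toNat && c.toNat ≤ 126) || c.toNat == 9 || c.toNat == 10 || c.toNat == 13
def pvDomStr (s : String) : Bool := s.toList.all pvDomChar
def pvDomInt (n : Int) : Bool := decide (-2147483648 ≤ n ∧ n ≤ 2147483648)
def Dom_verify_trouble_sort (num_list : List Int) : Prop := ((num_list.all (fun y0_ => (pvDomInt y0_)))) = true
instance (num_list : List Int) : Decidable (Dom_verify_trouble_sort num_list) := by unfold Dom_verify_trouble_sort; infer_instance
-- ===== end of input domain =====

-- B replaces A's fixpoint loop of stride-2 bubble passes by sorting the even- and odd-index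
-- sublists separately, interleaving and scanning once (faster; both versions sort the caller's
-- list in place identically — the theorem is about the returned string).


-- ===== PORT A =====
-- one swap-or-skip step of the inner 'for i in range(len(num_list) - 2)' loop
def passStep (st : List Int × Bool) (i : Int) : List Int × Bool :=
  let a := PySem.List.pyGetD st.1 i 0
  let b := PySem.List.pyGetD st.1 (i + 2) 0
  if a > b then
    (PySem.List.pySetD (PySem.List.pySetD st.1 i b) (i + 2) a, false)
  else st

-- one full pass of the inner for-loop, starting with done = True
def troublePass (l : List Int) : List Int × Bool :=
  (PySem.List.pyRange 0 ((l.length : Int) - 2) 1).foldl passStep (l, true)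

-- the 'while not done' loop; fuel n*n+1 is supplied by verify_trouble_sort and is proved
-- sufficient below (each not-done pass strictly decreases the parity-class inversion count < n*n+1)
def troubleLoop : Nat → List Int → List Int
  | 0, l => l
  | fuel + 1, l =>
    let st := troublePass l
    if st.2 then st.1 else troubleLoop fuel st.1

-- the final scan: prev = None; for idx, item in enumerate(...)  (int(item) is the identity on ints)
def scanA : List (Int × Int) → Option Int → String
  | [], _ => "OK"
  | (idx, item) :: rest, prev =>
    match prev with
    | none => scanA rest (some item)
    | some p => if item < p then PySem.Int.toStr (idx - 1) else scanA rest (some item)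

def verify_trouble_sort (num_list : List Int) : String :=
  let l := troubleLoop (num_list.length * num_list.length + 1) num_list
  scanA (PySem.List.enumerate l 0) none

-- ===== PORT B =====
-- the final scan of Source B: for i, (a, b) in enumerate(zip(result, result[1:]))
def scanB : List (Int × (Int × Int)) → String
  | [] => "OK"
  | (i, ab) :: rest => if ab.1 > ab.2 then PySem.Int.toStr i else scanB rest

def verify_trouble_sort_alt (num_list : List Int) : String :=
  let p := (PySem.List.enumerate num_list 0).foldl
    (fun (acc : List Int × List Int) ix =>
      if PySem.Int.mod ix.1 2 == 0 then (acc.1 ++ [ix.2], acc.2) else (acc.1, acc.2 ++ [ix.2]))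
    ([], [])
  let evens := PySem.List.sorted p.1 (fun x => x) false
  let odds := PySem.List.sorted p.2 (fun x => x) false
  let base := (evens.zip odds).foldl (fun acc eo => acc ++ [eo.1] ++ [eo.2]) []
  -- evens[-1]: in the branch odds.length < evens.length, evens is nonempty, so index -1 is in range
  let result := if odds.length < evens.length then base ++ [PySem.List.pyGetD evens (-1) 0] else base
  scanB (PySem.List.enumerate (result.zip (PySem.List.slice result (some 1) none)) 0)

-- ===== PRECONDITION & SPEC =====
def Spec_verify_trouble_sort (num_list : List Int) (out : String) : Prop := out = verify_trouble_sort_alt num_list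
instance (num_list : List Int) (out : String) : Decidable (Spec_verify_trouble_sort num_list out) := by unfold Spec_verify_trouble_sort; infer_instance

-- ===== CLAIM (what is proved, stated in full; the proofs are below) =====
def Claim_equal_verify_trouble_sort : Prop := ∀ (num_list : List Int), Dom_verify_trouble_sort num_list → Spec_verify_trouble_sort num_list (verify_trouble_sort num_list)

-- ===== LEMMAS AND PROOFS =====

-- even-/odd-index sublists, structurally
def eo : List Int → List Int × List Int
  | [] => ([], [])
  | x :: xs => ((x :: (eo xs).2), (eo xs).1)

def esl (l : List Int) : List Int := (eo l).1
def osl (l : List Int) : List Int := (eo l).2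

-- inversion count
def invc : List Int → Nat
  | [] => 0
  | x :: xs => xs.countP (fun y => decide (y < x)) + invc xs

def inv2 (l : List Int) : Nat := invc (esl l) + invc (osl l)

theorem esl_cons (x : Int) (xs : List Int) : esl (x :: xs) = x :: osl xs := rfl
theorem osl_cons (x : Int) (xs : List Int) : osl (x :: xs) = esl xs := rfl

theorem eo_len (l : List Int) :
    (esl l).length = (l.length + 1) / 2 ∧ (osl l).length = l.length / 2 := by
  induction l with
  | nil => simp [esl, osl, eo]
  | cons x xs ih =>
    simp only [esl_cons, osl_cons, List.length_cons] at *
    omega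

theorem eo_get (l : List Int) : ∀ k : Nat, (esl l)[k]? = l[2 * k]? ∧ (osl l)[k]? = l[2 * k + 1]? := by
  induction l with
  | nil => intro k; simp [esl, osl, eo]
  | cons x xs ih =>
    intro k
    constructor
    · cases k with
      | zero => simp [esl_cons]
      | succ k =>
        have h2 : 2 * (k + 1) = (2 * k + 1) + 1 := by omega
        simp only [esl_cons, List.getElem?_cons_succ, h2]
        exact (ih k).2
    · simp only [osl_cons, List.getElem?_cons_succ]
      exact (ih k).1

theorem eo_set (l : List Int) : ∀ (k : Nat) (v : Int),
    esl (l.set (2 * k) v) = (esl l).set k v ∧ osl (l.set (2 * k) v) = osl l ∧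
    esl (l.set (2 * k + 1) v) = esl l ∧ osl (l.set (2 * k + 1) v) = (osl l).set k v := by
  induction l with
  | nil => intro k v; simp [esl, osl, eo]
  | cons x xs ih =>
    intro k v
    refine ⟨?_, ?_, ?_, ?_⟩
    · cases k with
      | zero => simp [esl_cons]
      | succ k =>
        have h2 : 2 * (k + 1) = (2 * k + 1) + 1 := by omega
        simp only [h2, List.set_cons_succ, esl_cons, List.set_cons_succ]
        rw [(ih k v).2.2.2]
    · cases k with
      | zero => simp [osl_cons]
      | succ k =>
        have h2 : 2 * (k + 1) = (2 * k + 1) + 1 := by omega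
        simp only [h2, List.set_cons_succ, osl_cons]
        rw [(ih k v).2.2.1]
    · simp only [List.set_cons_succ, esl_cons]
      rw [(ih k v).2.1]
    · simp only [List.set_cons_succ, osl_cons]
      rw [(ih k v).1]

-- double set at adjacent positions as an explicit adjacent transposition
theorem set_set_adj (E : List Int) : ∀ (k : Nat), k + 1 < E.length →
    ∀ (a b : Int), E = E.take k ++ E.getD k 0 :: E.getD (k + 1) 0 :: E.drop (k + 2) ∧
      (E.set k b).set (k + 1) a = E.take k ++ b :: a :: E.drop (k + 2) := by
  induction E with
  | nil => intro k h; simp at h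
  | cons x xs ih =>
    intro k h a b
    cases k with
    | zero =>
      match xs, h with
      | y :: ys, _ => simp
    | succ k =>
      have h' : k + 1 < xs.length := by simpa using h
      obtain ⟨h1, h2⟩ := ih k h' a b
      constructor
      · simpa using h1
      · simpa using h2

-- an adjacent transposition putting the smaller first strictly decreases the inversion count
theorem invc_swap (a b : Int) (h : b < a) :
    ∀ (xs ys : List Int), invc (xs ++ b :: a :: ys) < invc (xs ++ a :: b :: ys) := by
  intro xs
  induction xs with
  | nil =>
    intro ys
    simp [invc, h, not_lt.mpr (le_of_lt h)]
    omega
  | cons x xs ih =>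
    intro ys
    simp only [List.cons_append, invc]
    have hc : (xs ++ b :: a :: ys).countP (fun y => decide (y < x)) =
        (xs ++ a :: b :: ys).countP (fun y => decide (y < x)) := by
      simp [List.countP_append, List.countP_cons]
      omega
    rw [hc]
    have := ih ys
    omega

-- the pass fold invariant, by induction on the number of remaining indices
theorem pass_fold_aux (n : Nat) (k : Nat) : ∀ (a : Int) (m : List Int) (d : Bool),
    ((n : Int) - 2 - a).toNat = k → 0 ≤ a → m.length = n →
    ((PySem.List.pyRange a ((n : Int) - 2) 1).foldl passStep (m, d)).1.length = n ∧
    (esl ((PySem.List.pyRange a ((n : Int) - 2) 1).foldl passStep (m, d)).1).Perm (esl m) ∧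
    (osl ((PySem.List.pyRange a ((n : Int) - 2) 1).foldl passStep (m, d)).1).Perm (osl m) ∧
    (((PySem.List.pyRange a ((n : Int) - 2) 1).foldl passStep (m, d)).2 = true →
      ((PySem.List.pyRange a ((n : Int) - 2) 1).foldl passStep (m, d)).1 = m ∧ d = true ∧
      ∀ j : Nat, a ≤ (j : Int) → j + 2 < n → m.getD j 0 ≤ m.getD (j + 2) 0) ∧
    (inv2 ((PySem.List.pyRange a ((n : Int) - 2) 1).foldl passStep (m, d)).1 ≤ inv2 m) ∧
    (((PySem.List.pyRange a ((n : Int) - 2) 1).foldl passStep (m, d)).2 = false → d = true →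
      inv2 ((PySem.List.pyRange a ((n : Int) - 2) 1).foldl passStep (m, d)).1 < inv2 m) := by
  induction k with
  | zero =>
    intro a m d hk ha hm
    rw [PySem.List.pyRange_one_eq_nil (by omega)]
    simp only [List.foldl_nil]
    refine ⟨hm, List.Perm.refl _, List.Perm.refl _, ?_, le_refl _, ?_⟩
    · intro h
      exact ⟨by trivial, h, fun j hja hj2 => by omega⟩
    · intro hf hd
      rw [hd] at hf
      simp at hf
  | succ k ih =>
    intro a m d hk ha hm
    obtain ⟨j, rfl⟩ : ∃ j : Nat, a = (j : Int) := ⟨a.toNat, by omega⟩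
    have hab : (j : Int) < (n : Int) - 2 := by omega
    have hjn : j + 2 < n := by omega
    have h2 : ((j : Int) + 2) = ((j + 2 : Nat) : Int) := by push_cast; ring
    have g1 : PySem.List.pyGetD m (j : Int) 0 = m.getD j 0 := by
      rw [PySem.List.pyGetD_of_nonneg _ _ (Int.natCast_nonneg _),
        show ((j : Int)).toNat = j from by omega]
    have g2 : PySem.List.pyGetD m ((j : Int) + 2) 0 = m.getD (j + 2) 0 := by
      rw [PySem.List.pyGetD_of_nonneg _ _ (by omega : (0 : Int) ≤ (j : Int) + 2),
        show ((j : Int) + 2).toNat = j + 2 from by omega]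
    have hstep : passStep (m, d) (j : Int) =
        if m.getD (j + 2) 0 < m.getD j 0 then
          ((m.set j (m.getD (j + 2) 0)).set (j + 2) (m.getD j 0), false)
        else (m, d) := by
      show (if PySem.List.pyGetD m (j : Int) 0 > PySem.List.pyGetD m ((j : Int) + 2) 0 then _ else _) = _
      rw [g1, g2, PySem.List.pySetD_of_nonneg _ _ (Int.natCast_nonneg _),
        show ((j : Int)).toNat = j from by omega,
        PySem.List.pySetD_of_nonneg _ _ (by omega : (0 : Int) ≤ (j : Int) + 2),
        show ((j : Int) + 2).toNat = j + 2 from by omega]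
    rw [PySem.List.pyRange_one_cons hab, List.foldl_cons, hstep]
    by_cases hsw : m.getD (j + 2) 0 < m.getD j 0
    · rw [if_pos hsw]
      -- the swapped list
      set bv := m.getD (j + 2) 0 with hbv
      set av := m.getD j 0 with hav
      set m1 := (m.set j bv).set (j + 2) av with hm1
      have hm1len : m1.length = n := by simp [hm1, hm]
      -- parity split of the swap
      have hswap : (esl m1).Perm (esl m) ∧ osl m1 = osl m ∧ inv2 m1 < inv2 m ∨
          (osl m1).Perm (osl m) ∧ esl m1 = esl m ∧ inv2 m1 < inv2 m := by
        rcases Nat.even_or_odd j with ⟨c, hc⟩ | ⟨c, hc⟩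
        · left
          have hj2c : j = 2 * c := by omega
          have heS : esl m1 = ((esl m).set c bv).set (c + 1) av := by
            rw [hm1, hj2c, show 2 * c + 2 = 2 * (c + 1) from by ring,
              (eo_set (m.set (2 * c) bv) (c + 1) av).1, (eo_set m c bv).1]
          have hoS : osl m1 = osl m := by
            rw [hm1, hj2c, show 2 * c + 2 = 2 * (c + 1) from by ring,
              (eo_set (m.set (2 * c) bv) (c + 1) av).2.1, (eo_set m c bv).2.1]
          have hclen : c + 1 < (esl m).length := by
            have := (eo_len m).1
            omega
          obtain ⟨hdec, hset⟩ := set_set_adj (esl m) (c + 1 - 1) (by omega) av bv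
          have hEk : (esl m).getD c 0 = av := by
            rw [List.getD_eq_getElem?_getD, (eo_get m c).1, ← List.getD_eq_getElem?_getD, hav]
            congr 1
            omega
          have hEk1 : (esl m).getD (c + 1) 0 = bv := by
            rw [List.getD_eq_getElem?_getD, (eo_get m (c + 1)).1, ← List.getD_eq_getElem?_getD, hbv]
            congr 1
            omega
          simp only [Nat.add_sub_cancel] at hdec hset
          rw [hEk, hEk1] at hdec
          rw [heS, hset]
          have hperm : ((esl m).take c ++ bv :: av :: (esl m).drop (c + 2)).Perm (esl m) := by
            conv_rhs => rw [hdec]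
            exact List.Perm.append_left _ (List.Perm.swap av bv _)
          refine ⟨hperm, hoS, ?_⟩
          have hinv : invc ((esl m).take c ++ bv :: av :: (esl m).drop (c + 2)) < invc (esl m) := by
            conv_rhs => rw [hdec]
            exact invc_swap av bv hsw _ _
          unfold inv2
          rw [heS, hset, hoS]
          omega
        · right
          have hj2c : j = 2 * c + 1 := by omega
          have heS : osl m1 = ((osl m).set c bv).set (c + 1) av := by
            rw [hm1, hj2c, show 2 * c + 1 + 2 = 2 * (c + 1) + 1 from by ring,
              (eo_set (m.set (2 * c + 1) bv) (c + 1) av).2.2.2, (eo_set m c bv).2.2.2]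
          have hoS : esl m1 = esl m := by
            rw [hm1, hj2c, show 2 * c + 1 + 2 = 2 * (c + 1) + 1 from by ring,
              (eo_set (m.set (2 * c + 1) bv) (c + 1) av).2.2.1, (eo_set m c bv).2.2.1]
          have hclen : c + 1 < (osl m).length := by
            have := (eo_len m).2
            omega
          obtain ⟨hdec, hset⟩ := set_set_adj (osl m) (c + 1 - 1) (by omega) av bv
          have hEk : (osl m).getD c 0 = av := by
            rw [List.getD_eq_getElem?_getD, (eo_get m c).2, ← List.getD_eq_getElem?_getD, hav]
            congr 1
            omega
          have hEk1 : (osl m).getD (c + 1) 0 = bv := by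
            rw [List.getD_eq_getElem?_getD, (eo_get m (c + 1)).2, ← List.getD_eq_getElem?_getD, hbv]
            congr 1
            omega
          simp only [Nat.add_sub_cancel] at hdec hset
          rw [hEk, hEk1] at hdec
          rw [heS, hset]
          have hperm : ((osl m).take c ++ bv :: av :: (osl m).drop (c + 2)).Perm (osl m) := by
            conv_rhs => rw [hdec]
            exact List.Perm.append_left _ (List.Perm.swap av bv _)
          refine ⟨hperm, hoS, ?_⟩
          have hinv : invc ((osl m).take c ++ bv :: av :: (osl m).drop (c + 2)) < invc (osl m) := by
            conv_rhs => rw [hdec]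
            exact invc_swap av bv hsw _ _
          unfold inv2
          rw [heS, hset, hoS]
          omega
      have hpE : (esl m1).Perm (esl m) := by
        rcases hswap with ⟨h1, _, _⟩ | ⟨_, h1, _⟩
        · exact h1
        · rw [h1]
      have hpO : (osl m1).Perm (osl m) := by
        rcases hswap with ⟨_, h1, _⟩ | ⟨h1, _, _⟩
        · rw [h1]
        · exact h1
      have hinv : inv2 m1 < inv2 m := by
        rcases hswap with ⟨_, _, h1⟩ | ⟨_, _, h1⟩ <;> exact h1
      have hrec := ih ((j : Int) + 1) m1 false (by omega) (by omega) hm1len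
      refine ⟨hrec.1, hrec.2.1.trans hpE, hrec.2.2.1.trans hpO, ?_, ?_, ?_⟩
      · intro hdone
        have := (hrec.2.2.2.1 hdone).2.1
        simp at this
      · exact le_trans hrec.2.2.2.2.1 (le_of_lt hinv)
      · intro _ _
        exact lt_of_le_of_lt hrec.2.2.2.2.1 hinv
    · rw [if_neg hsw]
      have hrec := ih ((j : Int) + 1) m d (by omega) (by omega) hm
      refine ⟨hrec.1, hrec.2.1, hrec.2.2.1, ?_, hrec.2.2.2.2.1, hrec.2.2.2.2.2⟩
      intro hdone
      obtain ⟨hq, hd, hsorted⟩ := hrec.2.2.2.1 hdone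
      refine ⟨hq, hd, ?_⟩
      intro j' hja hj2
      by_cases hjj : j' = j
      · subst hjj
        exact not_lt.mp hsw
      · exact hsorted j' (by omega) hj2

theorem pass_fold (n : Nat) : ∀ (a : Int) (m : List Int) (d : Bool), 0 ≤ a → m.length = n →
    ((PySem.List.pyRange a ((n : Int) - 2) 1).foldl passStep (m, d)).1.length = n ∧
    (esl ((PySem.List.pyRange a ((n : Int) - 2) 1).foldl passStep (m, d)).1).Perm (esl m) ∧
    (osl ((PySem.List.pyRange a ((n : Int) - 2) 1).foldl passStep (m, d)).1).Perm (osl m) ∧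
    (((PySem.List.pyRange a ((n : Int) - 2) 1).foldl passStep (m, d)).2 = true →
      ((PySem.List.pyRange a ((n : Int) - 2) 1).foldl passStep (m, d)).1 = m ∧ d = true ∧
      ∀ j : Nat, a ≤ (j : Int) → j + 2 < n → m.getD j 0 ≤ m.getD (j + 2) 0) ∧
    (inv2 ((PySem.List.pyRange a ((n : Int) - 2) 1).foldl passStep (m, d)).1 ≤ inv2 m) ∧
    (((PySem.List.pyRange a ((n : Int) - 2) 1).foldl passStep (m, d)).2 = false → d = true →
      inv2 ((PySem.List.pyRange a ((n : Int) - 2) 1).foldl passStep (m, d)).1 < inv2 m) :=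
  fun a m d ha hm => pass_fold_aux n (((n : Int) - 2 - a).toNat) a m d rfl ha hm

-- the loop reaches the fixpoint when fuel exceeds the inversion count
theorem loop_spec : ∀ (fuel : Nat) (l : List Int), inv2 l < fuel →
    (troubleLoop fuel l).length = l.length ∧
    (esl (troubleLoop fuel l)).Perm (esl l) ∧ (osl (troubleLoop fuel l)).Perm (osl l) ∧
    ∀ j : Nat, j + 2 < l.length →
      (troubleLoop fuel l).getD j 0 ≤ (troubleLoop fuel l).getD (j + 2) 0 := by
  intro fuel
  induction fuel with
  | zero => intro l h; omega
  | succ fuel ih =>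
    intro l h
    have hp := pass_fold l.length 0 l true (le_refl 0) rfl
    rw [show List.foldl passStep (l, true) (PySem.List.pyRange 0 ((l.length : Int) - 2)) = troublePass l from rfl] at hp
    have hL : troubleLoop (fuel + 1) l =
        if (troublePass l).2 then (troublePass l).1 else troubleLoop fuel (troublePass l).1 := rfl
    by_cases hd : (troublePass l).2 = true
    · obtain ⟨heq, -, hsort⟩ := hp.2.2.2.1 hd
      rw [hL, if_pos hd, heq]
      exact ⟨rfl, List.Perm.refl _, List.Perm.refl _, fun j hj => hsort j (by omega) hj⟩
    · have hd' : (troublePass l).2 = false := by simpa using hd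
      have hlt : inv2 (troublePass l).1 < inv2 l := hp.2.2.2.2.2 hd' rfl
      have hlen : (troublePass l).1.length = l.length := hp.1
      have hih := ih (troublePass l).1 (by omega)
      rw [hL, if_neg (by simp [hd'])]
      refine ⟨by rw [hih.1, hlen], (hih.2.1).trans hp.2.1, (hih.2.2.1).trans hp.2.2.1, ?_⟩
      intro j hj
      exact hih.2.2.2 j (by omega)

theorem invc_le (xs : List Int) : invc xs ≤ xs.length * xs.length := by
  induction xs with
  | nil => simp [invc]
  | cons x xs ih =>
    have hc := List.countP_le_length (l := xs) (p := fun y => decide (y < x))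
    simp only [invc, List.length_cons]
    nlinarith

theorem inv2_lt (l : List Int) : inv2 l < l.length * l.length + 1 := by
  have he := eo_len l
  have h1 := invc_le (esl l)
  have h2 := invc_le (osl l)
  have hn : (esl l).length + (osl l).length = l.length := by omega
  unfold inv2
  nlinarith

-- stride-2 chain extends to all stride-2-reachable pairs
theorem sorted2_trans (r : List Int)
    (h : ∀ j : Nat, j + 2 < r.length → r.getD j 0 ≤ r.getD (j + 2) 0) :
    ∀ (d j : Nat), j + 2 * d < r.length → r.getD j 0 ≤ r.getD (j + 2 * d) 0 := by
  intro d
  induction d with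
  | zero => intro j _; simp
  | succ d ih =>
    intro j hj
    have h1 : r.getD j 0 ≤ r.getD (j + 2) 0 := h j (by omega)
    have h2 : r.getD (j + 2) 0 ≤ r.getD (j + 2 + 2 * d) 0 := ih (j + 2) (by omega)
    have : j + 2 + 2 * d = j + 2 * (d + 1) := by omega
    rw [this] at h2
    exact le_trans h1 h2

-- stride-2 sortedness gives sortedness of each parity sublist
theorem pairwise_of_sorted2 (r : List Int)
    (h : ∀ j : Nat, j + 2 < r.length → r.getD j 0 ≤ r.getD (j + 2) 0) :
    (esl r).Pairwise (· ≤ ·) ∧ (osl r).Pairwise (· ≤ ·) := by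
  have hlen := eo_len r
  constructor
  · rw [List.pairwise_iff_getElem]
    intro i j hi hj hij
    have h2j : 2 * j < r.length := by omega
    have h2i : 2 * i < r.length := by omega
    have gi : (esl r)[i] = r.getD (2 * i) 0 := by
      rw [← List.getD_eq_getElem (esl r) 0 hi, List.getD_eq_getElem?_getD,
        (eo_get r i).1, ← List.getD_eq_getElem?_getD]
    have gj : (esl r)[j] = r.getD (2 * j) 0 := by
      rw [← List.getD_eq_getElem (esl r) 0 hj, List.getD_eq_getElem?_getD,
        (eo_get r j).1, ← List.getD_eq_getElem?_getD]
    rw [gi, gj]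
    have := sorted2_trans r h (j - i) (2 * i) (by omega)
    have he : 2 * i + 2 * (j - i) = 2 * j := by omega
    rwa [he] at this
  · rw [List.pairwise_iff_getElem]
    intro i j hi hj hij
    have h2j : 2 * j + 1 < r.length := by omega
    have gi : (osl r)[i] = r.getD (2 * i + 1) 0 := by
      rw [← List.getD_eq_getElem (osl r) 0 hi, List.getD_eq_getElem?_getD,
        (eo_get r i).2, ← List.getD_eq_getElem?_getD]
    have gj : (osl r)[j] = r.getD (2 * j + 1) 0 := by
      rw [← List.getD_eq_getElem (osl r) 0 hj, List.getD_eq_getElem?_getD,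
        (eo_get r j).2, ← List.getD_eq_getElem?_getD]
    rw [gi, gj]
    have := sorted2_trans r h (j - i) (2 * i + 1) (by omega)
    have he : 2 * i + 1 + 2 * (j - i) = 2 * j + 1 := by omega
    rwa [he] at this

-- B's splitting fold computes the structural parity sublists
theorem split_fold (xs : List Int) : ∀ (s : Int) (accE accO : List Int),
    (if PySem.Int.mod s 2 = 0 then
      (PySem.List.enumerate xs s).foldl
        (fun (acc : List Int × List Int) ix =>
          if PySem.Int.mod ix.1 2 == 0 then (acc.1 ++ [ix.2], acc.2) else (acc.1, acc.2 ++ [ix.2]))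
        (accE, accO) = (accE ++ esl xs, accO ++ osl xs)
    else
      (PySem.List.enumerate xs s).foldl
        (fun (acc : List Int × List Int) ix =>
          if PySem.Int.mod ix.1 2 == 0 then (acc.1 ++ [ix.2], acc.2) else (acc.1, acc.2 ++ [ix.2]))
        (accE, accO) = (accE ++ osl xs, accO ++ esl xs)) := by
  induction xs with
  | nil => intro s accE accO; simp [esl, osl, eo, PySem.List.enumerate_nil]
  | cons x xs ih =>
    intro s accE accO
    have hm : PySem.Int.mod s 2 = s % 2 := PySem.Int.mod_eq_emod_of_pos (by norm_num)
    have hm1 : PySem.Int.mod (s + 1) 2 = (s + 1) % 2 := PySem.Int.mod_eq_emod_of_pos (by norm_num)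
    rw [PySem.List.enumerate_cons]
    by_cases hs : s % 2 = 0
    · rw [if_pos (by omega)]
      have hc : (PySem.Int.mod s 2 == 0) = true := by rw [hm]; simpa using hs
      simp only [List.foldl_cons]
      rw [if_pos hc]
      have hrec := ih (s + 1) (accE ++ [x]) accO
      rw [if_neg (by omega)] at hrec
      rw [hrec]
      simp [esl_cons, osl_cons]
    · have hc : ¬ ((PySem.Int.mod s 2 == 0) = true) := by rw [hm]; simp; omega
      rw [if_neg (by omega)]
      simp only [List.foldl_cons]
      rw [if_neg hc]
      have hrec := ih (s + 1) accE (accO ++ [x])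
      rw [if_pos (by omega)] at hrec
      rw [hrec]
      simp [esl_cons, osl_cons]

theorem pyGetD_neg_one (xs : List Int) (d : Int) (h : xs ≠ []) :
    PySem.List.pyGetD xs (-1) d = xs.getD (xs.length - 1) d := by
  have hl : 0 < xs.length := List.length_pos_iff.mpr h
  simp [PySem.List.pyGetD, PySem.List.pyGet?, PySem.List.pyIdx?, List.getD_eq_getElem?_getD]
  split
  · simp
  · omega

theorem pyGetD_neg_one_cons (z a : Int) (t : List Int) :
    PySem.List.pyGetD (z :: a :: t) (-1) 0 = PySem.List.pyGetD (a :: t) (-1) 0 := by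
  rw [pyGetD_neg_one _ _ (by simp), pyGetD_neg_one _ _ (by simp)]
  simp
  rfl

-- B's interleaving rebuilds the list from its parity sublists
theorem interleave_eq : ∀ (r : List Int),
    (if (osl r).length < (esl r).length then
      ((esl r).zip (osl r)).flatMap (fun p => [p.1, p.2]) ++ [PySem.List.pyGetD (esl r) (-1) 0]
    else ((esl r).zip (osl r)).flatMap (fun p => [p.1, p.2])) = r
  | [] => by simp [esl, osl, eo]
  | [x] => by
    show (if ([] : List Int).length < [x].length then
        ([x].zip ([] : List Int)).flatMap (fun p => [p.1, p.2]) ++ [PySem.List.pyGetD [x] (-1) 0]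
      else ([x].zip ([] : List Int)).flatMap (fun p => [p.1, p.2])) = [x]
    rw [if_pos (by simp)]
    rw [pyGetD_neg_one [x] 0 (by simp)]
    simp
  | x :: y :: xs => by
    have ih := interleave_eq xs
    have he : esl (x :: y :: xs) = x :: esl xs := by rw [esl_cons, osl_cons]
    have ho : osl (x :: y :: xs) = y :: osl xs := by rw [osl_cons, esl_cons]
    rw [he, ho]
    simp only [List.zip_cons_cons, List.flatMap_cons, List.length_cons]
    by_cases hlt : (osl xs).length < (esl xs).length
    · rw [if_pos (by omega)]
      rw [if_pos hlt] at ih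
      obtain ⟨a, t, hat⟩ : ∃ a t, esl xs = a :: t := by
        cases hesl : esl xs with
        | nil => rw [hesl] at hlt; simp at hlt
        | cons a t => exact ⟨a, t, rfl⟩
      rw [hat, pyGetD_neg_one_cons, ← hat]
      simpa using ih
    · rw [if_neg (by omega)]
      rw [if_neg hlt] at ih
      simpa using ih

theorem build_eq (r : List Int) :
    (if (osl r).length < (esl r).length then
      ((esl r).zip (osl r)).foldl (fun acc eo => acc ++ [eo.1] ++ [eo.2]) [] ++
        [PySem.List.pyGetD (esl r) (-1) 0]
    else ((esl r).zip (osl r)).foldl (fun acc eo => acc ++ [eo.1] ++ [eo.2]) []) = r := by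
  have hfun : (fun (acc : List Int) (eo : Int × Int) => acc ++ [eo.1] ++ [eo.2]) =
      (fun (acc : List Int) (eo : Int × Int) => acc ++ [eo.1, eo.2]) := by
    funext acc p; simp
  rw [hfun, PySem.List.foldl_append_eq_flatMap]
  simpa using interleave_eq r

-- the two scans agree on any list
theorem scan_aux (xs : List Int) : ∀ (p s : Int),
    scanA (PySem.List.enumerate xs (s + 1)) (some p) =
    scanB (PySem.List.enumerate ((p :: xs).zip xs) s) := by
  induction xs with
  | nil => intro p s; simp [PySem.List.enumerate_nil, scanA, scanB]
  | cons y ys ih =>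
    intro p s
    rw [PySem.List.enumerate_cons]
    show (if y < p then PySem.Int.toStr (s + 1 - 1) else scanA (PySem.List.enumerate ys (s + 1 + 1)) (some y)) = _
    have hz : (p :: y :: ys).zip (y :: ys) = (p, y) :: ((y :: ys).zip ys) := rfl
    rw [hz, PySem.List.enumerate_cons]
    show _ = (if p > y then PySem.Int.toStr s else scanB (PySem.List.enumerate ((y :: ys).zip ys) (s + 1)))
    have : s + 1 - 1 = s := by omega
    rw [this]
    by_cases hyp : y < p
    · simp [hyp, gt_iff_lt]
    · simp only [if_neg hyp, gt_iff_lt, if_neg hyp]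
      exact ih y (s + 1)

theorem scan_eq (r : List Int) :
    scanA (PySem.List.enumerate r 0) none = scanB (PySem.List.enumerate (r.zip r.tail) 0) := by
  cases r with
  | nil => simp [PySem.List.enumerate_nil, scanA, scanB]
  | cons x xs =>
    rw [PySem.List.enumerate_cons]
    show scanA (PySem.List.enumerate xs (0 + 1)) (some x) = _
    have hz : (x :: xs).zip (x :: xs).tail = (x :: xs).zip xs := rfl
    rw [hz]
    exact scan_aux xs x 0

-- ===== VERDICT (by name: the statement is the Claim_ definition above) =====
theorem verify_trouble_sort_spec : Claim_equal_verify_trouble_sort := by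
  unfold Claim_equal_verify_trouble_sort
  intro l _
  unfold Spec_verify_trouble_sort
  set r := troubleLoop (l.length * l.length + 1) l with hr
  have hloop := loop_spec (l.length * l.length + 1) l (inv2_lt l)
  rw [← hr] at hloop
  have hsplit := split_fold l 0 [] []
  rw [if_pos (by decide)] at hsplit
  simp only [List.nil_append] at hsplit
  have hpairs := pairwise_of_sorted2 r (by
    intro j hj
    exact hloop.2.2.2 j (by omega))
  have hsortE : PySem.List.sorted (esl l) (fun x => x) false = esl r :=
    PySem.List.sorted_id_eq_of_perm_of_pairwise _ _ hloop.2.1 hpairs.1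
  have hsortO : PySem.List.sorted (osl l) (fun x => x) false = osl r :=
    PySem.List.sorted_id_eq_of_perm_of_pairwise _ _ hloop.2.2.1 hpairs.2
  have hA : verify_trouble_sort l = scanA (PySem.List.enumerate r 0) none := rfl
  have hB : verify_trouble_sort_alt l = scanB (PySem.List.enumerate (r.zip r.tail) 0) := by
    simp only [verify_trouble_sort_alt]
    rw [hsplit]
    simp only
    rw [hsortE, hsortO, build_eq r, PySem.List.slice_from_one]
  rw [hA, hB]
  exact scan_eq r
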